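-- pv_equiv track=rewrite | github.com/Aetherious/notebooks_julian | rixin_rw.py | find_min_restrictable_level
-- ===== SOURCE A (Python) =====
-- def find_min_restrictable_level(max_level, block_size):
--     if max_level == 0:
--         return 0
--     else:
--         for _level in range(max_level-1, -1, -1):  # from 2nd finest to root level
--             max_restrict_factor = 2**(max_level - _level)
--             for _block_size in block_size:
--                 if (_block_size != 1 and _block_size % max_restrict_factor != 0):
--                     return _level + 1
--         return 0
-- ===== SOURCE B (Python) =====
-- def find_min_restrictable_level(max_level, block_size):
--     # answer = max_level minus the minimum 2-adic valuation (capped) over blocks != 0,1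
--     if max_level <= 0:
--         return 0
--     minv = max_level
--     for b in block_size:
--         if b == 0 or b == 1:
--             continue
--         v = 0
--         while v < minv and b % 2 == 0:
--             b //= 2
--             v += 1
--         if v < minv:
--             minv = v
--     return max_level - minv
-- ===== Notes on version B (the rewrite author's own statement) =====
-- stated objective: alternative
-- what changed: Replaces A's descending scan over levels (each level re-testing every block's divisibility by a growing power of two) with a single pass over the blocks computing the minimum capped 2-adic valuation; the answer is max_level minus that minimum.
import Mathlib
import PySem

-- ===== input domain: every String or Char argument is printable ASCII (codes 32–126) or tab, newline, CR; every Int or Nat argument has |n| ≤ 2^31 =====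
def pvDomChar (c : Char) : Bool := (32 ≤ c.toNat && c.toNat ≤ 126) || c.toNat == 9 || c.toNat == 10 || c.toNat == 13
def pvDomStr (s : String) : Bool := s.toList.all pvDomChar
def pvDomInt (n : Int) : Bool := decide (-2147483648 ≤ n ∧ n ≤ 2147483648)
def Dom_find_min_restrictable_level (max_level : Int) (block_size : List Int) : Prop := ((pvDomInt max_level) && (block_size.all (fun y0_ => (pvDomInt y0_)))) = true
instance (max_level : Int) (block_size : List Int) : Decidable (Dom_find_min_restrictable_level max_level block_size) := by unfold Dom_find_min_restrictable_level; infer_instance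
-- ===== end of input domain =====

-- B replaces A's descending scan over levels (each re-testing every block) by one pass over the
-- blocks computing the minimum capped 2-adic valuation; objective: alternative algorithm.

-- ===== PORT A =====
-- inner 'for _block_size in block_size: if …: return _level + 1' — the level hits iff some block violates
def fmrlA_hit (f : Int) (bs : List Int) : Bool :=
  bs.any (fun b => decide (b ≠ 1) && decide (PySem.Int.mod b f ≠ 0))

-- 'for _level in range(max_level-1, -1, -1)' — counted down lazily, as Python's range is; the
-- fuel is the number of iterations (max_level-1 - (-1)), _level starts at max_level-1
def fmrlA_loop (max_level : Int) (block_size : List Int) : Nat → Int → Int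
  | 0, _ => 0
  | n + 1, lvl =>
      if fmrlA_hit (2 ^ (max_level - lvl).toNat) block_size then lvl + 1
      else fmrlA_loop max_level block_size n (lvl - 1)

def find_min_restrictable_level (max_level : Int) (block_size : List Int) : Int :=
  if max_level = 0 then 0
  else fmrlA_loop max_level block_size (max_level - 1 - (-1)).toNat (max_level - 1)

-- ===== PORT B =====
-- 'v = 0; while v < minv and b % 2 == 0: b //= 2; v += 1' — fuel-bounded 2-adic valuation
def fmrlB_v2 : Nat → Int → Nat
  | 0, _ => 0
  | n + 1, b =>
      if PySem.Int.mod b 2 = 0 then fmrlB_v2 n (PySem.Int.floordiv b 2) + 1 else 0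

def find_min_restrictable_level_alt (max_level : Int) (block_size : List Int) : Int :=
  if max_level ≤ 0 then 0
  else
    let minv := block_size.foldl
      (fun mv b => if b = 0 ∨ b = 1 then mv else min mv (fmrlB_v2 mv b)) max_level.toNat
    max_level - (minv : Int)

-- ===== PRECONDITION & SPEC =====
def Spec_find_min_restrictable_level (max_level : Int) (block_size : List Int) (out : Int) : Prop := out = find_min_restrictable_level_alt max_level block_size
instance (max_level : Int) (block_size : List Int) (out : Int) : Decidable (Spec_find_min_restrictable_level max_level block_size out) := by unfold Spec_find_min_restrictable_level; infer_instance

-- ===== CLAIM (what is proved, stated in full; the proofs are below) =====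
def Claim_equal_find_min_restrictable_level : Prop := ∀ (max_level : Int) (block_size : List Int), Dom_find_min_restrictable_level max_level block_size → Spec_find_min_restrictable_level max_level block_size (find_min_restrictable_level max_level block_size)

-- ===== LEMMAS AND PROOFS =====

-- 'every block is exempt (== 1) or divisible by 2^k'
def fmrlGood (k : Nat) (bs : List Int) : Prop := ∀ b ∈ bs, b = 1 ∨ (2 : Int) ^ k ∣ b

lemma fmrlGood_cons (k : Nat) (b : Int) (bs : List Int) :
    fmrlGood k (b :: bs) ↔ (b = 1 ∨ (2 : Int) ^ k ∣ b) ∧ fmrlGood k bs := by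
  simp [fmrlGood]

lemma fmrlB_v2_spec (n : Nat) (b : Int) (k : Nat) (hb : b ≠ 0) (hk : k ≤ n) :
    ((2 : Int) ^ k ∣ b ↔ k ≤ fmrlB_v2 n b) := by
  induction n generalizing b k with
  | zero =>
      interval_cases k
      simp [fmrlB_v2]
  | succ n ih =>
      cases k with
      | zero => simp
      | succ k =>
          by_cases h2 : (2 : Int) ∣ b
          · have hm : PySem.Int.mod b 2 = 0 := (PySem.Int.mod_eq_zero_iff_dvd b 2).2 h2
            obtain ⟨c, hc⟩ := h2
            have hdiv : PySem.Int.floordiv b 2 = c := by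
              rw [PySem.Int.floordiv_eq_ediv_of_pos (by norm_num), hc,
                Int.mul_ediv_cancel_left c (by norm_num)]
            have hc0 : c ≠ 0 := by rintro rfl; simp at hc; exact hb hc
            have hdv : (2 : Int) ^ (k + 1) ∣ b ↔ (2 : Int) ^ k ∣ c := by
              rw [hc, pow_succ, mul_comm ((2:Int)^k) 2]
              exact mul_dvd_mul_iff_left (by norm_num)
            simp only [fmrlB_v2, hm, if_pos, hdiv]
            rw [hdv, ih c k hc0 (by omega)]
            omega
          · have hm : PySem.Int.mod b 2 ≠ 0 := fun h => h2 ((PySem.Int.mod_eq_zero_iff_dvd b 2).1 h)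
            simp only [fmrlB_v2]
            rw [if_neg hm]
            exact ⟨fun hdvd => absurd (dvd_trans (dvd_pow_self 2 (Nat.succ_ne_zero k)) hdvd) h2,
              fun h => absurd h (by omega)⟩

-- invariant of B's fold
lemma fmrl_fold_spec (bs : List Int) (m0 : Nat) :
    (bs.foldl (fun mv b => if b = 0 ∨ b = 1 then mv else min mv (fmrlB_v2 mv b)) m0) ≤ m0 ∧
    ∀ k ≤ m0,
      (k ≤ bs.foldl (fun mv b => if b = 0 ∨ b = 1 then mv else min mv (fmrlB_v2 mv b)) m0 ↔
        fmrlGood k bs) := by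
  induction bs generalizing m0 with
  | nil =>
      refine ⟨le_refl _, fun k hk => ?_⟩
      simp [fmrlGood, hk]
  | cons b bs ih =>
      simp only [List.foldl_cons]
      set m1 := if b = 0 ∨ b = 1 then m0 else min m0 (fmrlB_v2 m0 b) with hm1
      have hm1le : m1 ≤ m0 := by
        rw [hm1]; split
        · exact le_refl _
        · exact min_le_left _ _
      obtain ⟨hle, hiff⟩ := ih m1
      refine ⟨le_trans hle hm1le, fun k hk => ?_⟩
      by_cases hb : b = 0 ∨ b = 1
      · have hm1' : m1 = m0 := by simp [hm1, hb]
        rw [hiff k (by omega), fmrlGood_cons]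
        have hbd : b = 1 ∨ (2 : Int) ^ k ∣ b := by
          rcases hb with rfl | rfl
          · exact Or.inr (dvd_zero _)
          · exact Or.inl rfl
        simp [hbd]
      · have hb0 : b ≠ 0 := fun h => hb (Or.inl h)
        have hb1 : b ≠ 1 := fun h => hb (Or.inr h)
        have hm1' : m1 = min m0 (fmrlB_v2 m0 b) := by simp [hm1, hb]
        by_cases hk1 : k ≤ m1
        · rw [hiff k hk1]
          have hdvd : (2 : Int) ^ k ∣ b := by
            rw [fmrlB_v2_spec m0 b k hb0 hk]
            omega
          rw [fmrlGood_cons]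
          simp [Or.inr hdvd]
        · have hnr : ¬ k ≤ bs.foldl _ m1 := fun h => hk1 (le_trans h hle)
          rw [iff_false_intro hnr, false_iff, fmrlGood_cons]
          rintro ⟨h1 | hdvd, -⟩
          · exact hb1 h1
          · have : k ≤ fmrlB_v2 m0 b := (fmrlB_v2_spec m0 b k hb0 hk).1 hdvd
            omega

-- A's inner scan hits iff divisibility by 2^j fails somewhere
lemma fmrlA_hit_iff (j : Nat) (bs : List Int) :
    fmrlA_hit ((2 : Int) ^ j) bs = true ↔ ¬ fmrlGood j bs := by
  simp [fmrlA_hit, fmrlGood, List.any_eq_true]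

-- first true of a monotone predicate on range' (used for A's descending level scan)
lemma fmrl_find_range' (q : Nat → Bool) (n s r : Nat) (hr : s ≤ r) (hrn : r < s + n)
    (hq : q r = true) (hmin : ∀ k, s ≤ k → k < r → q k = false) :
    (List.range' s n).find? q = some r := by
  induction n generalizing s with
  | zero => omega
  | succ n ih =>
      rw [List.range'_succ, List.find?_cons]
      by_cases hs : s = r
      · subst hs; simp [hq]
      · have : q s = false := hmin s (le_refl _) (by omega)
        simp only [this]
        exact ih (s + 1) (by omega) (by omega) (fun k hk1 hk2 => hmin k (by omega) hk2)

-- A's fuel loop as a find? over the iteration counter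
lemma fmrlA_loop_eq (ml : Int) (bs : List Int) (n : Nat) (lvl : Int) :
    fmrlA_loop ml bs n lvl =
      ((List.range n).find? (fun k : Nat => fmrlA_hit (2 ^ (ml - (lvl - (k : Int))).toNat) bs)).elim 0
        (fun k : Nat => (lvl - (k : Int)) + 1) := by
  induction n generalizing lvl with
  | zero => simp [fmrlA_loop]
  | succ n ih =>
      rw [fmrlA_loop]
      by_cases hhit : fmrlA_hit (2 ^ (ml - lvl).toNat) bs = true
      · rw [if_pos hhit, List.range_succ_eq_map, List.find?_cons_of_pos (h := by simpa using hhit)]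
        simp
      · rw [if_neg hhit, ih (lvl - 1), List.range_succ_eq_map,
          List.find?_cons_of_neg (h := by simpa using hhit), List.find?_map]
        have hfn : ((fun k : Nat => fmrlA_hit (2 ^ (ml - (lvl - (k : Int))).toNat) bs) ∘ Nat.succ)
            = (fun k : Nat => fmrlA_hit (2 ^ (ml - (lvl - 1 - (k : Int))).toNat) bs) := by
          funext k
          have h1 : lvl - ((k : Int) + 1) = lvl - 1 - (k : Int) := by ring
          simp [Function.comp, h1]
        rw [hfn]
        cases hfind : (List.range n).find?
            (fun k : Nat => fmrlA_hit (2 ^ (ml - (lvl - 1 - (k : Int))).toNat) bs) with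
        | none => simp
        | some k =>
            simp only [Option.map_some, Option.elim]
            push_cast
            ring

-- ===== VERDICT (by name: the statement is the Claim_ definition above) =====
theorem find_min_restrictable_level_spec : Claim_equal_find_min_restrictable_level := by
  intro ml bs _
  unfold Spec_find_min_restrictable_level
  unfold find_min_restrictable_level find_min_restrictable_level_alt
  by_cases hml : ml ≤ 0
  · rw [if_pos hml]
    by_cases h0 : ml = 0
    · rw [if_pos h0]
    · rw [if_neg h0]
      have hz : (ml - 1 - (-1)).toNat = 0 := by omega
      rw [hz]
      rfl
  · rw [if_neg hml]
    rw [if_neg (by omega : ¬ ml = 0)]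
    set m := ml.toNat with hm
    have hmlm : ml = (m : Int) := by omega
    have hsub : (ml - 1 - (-1)).toNat = m := by omega
    rw [hsub, fmrlA_loop_eq ml bs m (ml - 1)]
    have hpred : ∀ k : Nat,
        fmrlA_hit (2 ^ (ml - (ml - 1 - (k : Int))).toNat) bs
          = fmrlA_hit ((2 : Int) ^ (k + 1)) bs := by
      intro k
      have : (ml - (ml - 1 - (k : Int))).toNat = k + 1 := by omega
      simp [this]
    obtain ⟨hle, hiff⟩ := fmrl_fold_spec bs m
    set r := bs.foldl (fun mv b => if b = 0 ∨ b = 1 then mv else min mv (fmrlB_v2 mv b)) m with hr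
    by_cases hcase : r = m
    · -- no level hits: all k+1 ≤ m are Good
      have hnone : (List.range m).find?
          (fun k : Nat => fmrlA_hit (2 ^ (ml - (ml - 1 - (k : Int))).toNat) bs) = none := by
        rw [List.find?_eq_none]
        intro k hk
        rw [List.mem_range] at hk
        rw [hpred k]
        intro hhit
        exact (fmrlA_hit_iff (k + 1) bs).1 hhit ((hiff (k + 1) (by omega)).1 (by omega))
      rw [hnone]
      simp [hcase, hmlm]
    · have hrm : r < m := lt_of_le_of_ne hle hcase
      -- first hitting k is r
      have hsome : (List.range m).find?
          (fun k : Nat => fmrlA_hit (2 ^ (ml - (ml - 1 - (k : Int))).toNat) bs) = some r := by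
        rw [List.range_eq_range']
        apply fmrl_find_range' _ m 0 r (Nat.zero_le _) (by omega)
        · rw [hpred r, fmrlA_hit_iff]
          intro hgood
          have : r + 1 ≤ r := (hiff (r + 1) (by omega)).2 hgood
          omega
        · intro k _ hkr
          rw [hpred k, Bool.eq_false_iff, ne_eq, fmrlA_hit_iff, not_not]
          exact (hiff (k + 1) (by omega)).1 (by omega)
      rw [hsome]
      simp only [Option.elim, hmlm]
      omega
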